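-- pv_equiv track=rewrite | github.com/AguAlex/Univeristy-Work | Year II/[AA] Algoritmi Avansati/Alg_Geometrici/tema2/pb3.py | monoton
-- ===== SOURCE A (Python) =====
-- def monoton(polygon, axa='x'):
--     n = len(polygon)
--
--     # Alegem indexul minim si maxim in fct de axa
--     key = 0 if axa == 'x' else 1
--     min_idx = max_idx = 0
--     for i in range(1, n):
--         if polygon[i][key] < polygon[min_idx][key]:
--             min_idx = i
--         if polygon[i][key] > polygon[max_idx][key]:
--             max_idx = i
--
--     # Lant de la min_idx la max_idx crescator
--     i = min_idx
--     ok1 = True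
--     while i != max_idx:
--         next_i = (i + 1) % n
--         if polygon[next_i][key] < polygon[i][key]:
--             ok1 = False
--             break
--         i = next_i
--
--     # Lant de la min_idx la max_idx descrescator
--     i = min_idx
--     ok2 = True
--     while i != max_idx:
--         prev_i = (i - 1 + n) % n
--         if polygon[prev_i][key] < polygon[i][key]:
--             ok2 = False
--             break
--         i = prev_i
--
--     return ok1 and ok2
-- ===== SOURCE B (Python) =====
-- def monoton(polygon, axa='x'):
--     key = 0 if axa == 'x' else 1
--     ks = [p[key] for p in polygon]
--     if not ks:
--         return True
--     n = len(ks)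
--     i0 = ks.index(min(ks))
--     i1 = ks.index(max(ks))
--     rot = ks[i0:] + ks[:i0]
--     m = (i1 - i0) % n
--     up = rot[:m + 1]
--     down = rot[m:] + [rot[0]]
--     return all(x <= y for x, y in zip(up, up[1:])) and \
--            all(x >= y for x, y in zip(down, down[1:]))
-- ===== Notes on version B (the rewrite author's own statement) =====
-- stated objective: simpler
-- what changed: Replaces the index-chasing design (min/max scan plus two modular while-walks from min_idx with break flags) by a list-level one: extract the key list, rotate it to start at the first minimum, split it at the first maximum, and check the two halves are pairwise non-decreasing / non-increasing.
import Mathlib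
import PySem

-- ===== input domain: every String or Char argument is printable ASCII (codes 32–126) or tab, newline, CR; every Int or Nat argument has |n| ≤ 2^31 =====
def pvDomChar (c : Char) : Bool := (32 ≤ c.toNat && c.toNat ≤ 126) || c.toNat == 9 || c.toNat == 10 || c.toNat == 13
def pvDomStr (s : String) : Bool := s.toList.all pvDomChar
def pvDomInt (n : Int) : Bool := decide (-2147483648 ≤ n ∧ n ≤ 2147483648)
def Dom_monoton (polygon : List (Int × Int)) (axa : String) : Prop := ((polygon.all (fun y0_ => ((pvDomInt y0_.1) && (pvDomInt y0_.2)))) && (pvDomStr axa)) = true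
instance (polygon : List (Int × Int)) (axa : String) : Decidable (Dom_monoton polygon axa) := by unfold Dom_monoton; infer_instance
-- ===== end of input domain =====

-- B replaces A's min/max scan plus two modular-index while-walks by a rotate-to-min,
-- split-at-max, pairwise-sortedness check on the rotated key list (objective: simpler; same cost).

-- ===== PORT A =====
-- polygon[i][key]; in A both indexings are always in range (i is 0 or taken mod n with n = len(polygon), key ∈ {0,1}), so the `none` default is unreachable
def pvKeyAt (polygon : List (Int × Int)) (key : Int) (i : Int) : Int :=
  match PySem.List.pyGet? polygon i with
  | some p => if key == 0 then p.1 else p.2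
  | none => 0

-- the two while-loops; the Python loop performs at most n-1 iterations, so fuel = n is exact
def pvChainUp (polygon : List (Int × Int)) (key n maxI : Int) : Int → Nat → Bool
  | _, 0 => true
  | i, fuel+1 =>
    if i = maxI then true
    else
      let nextI := PySem.Int.mod (i + 1) n
      if pvKeyAt polygon key nextI < pvKeyAt polygon key i then false
      else pvChainUp polygon key n maxI nextI fuel

def pvChainDown (polygon : List (Int × Int)) (key n maxI : Int) : Int → Nat → Bool
  | _, 0 => true
  | i, fuel+1 =>
    if i = maxI then true
    else
      let prevI := PySem.Int.mod (i - 1 + n) n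
      if pvKeyAt polygon key prevI < pvKeyAt polygon key i then false
      else pvChainDown polygon key n maxI prevI fuel

def monoton (polygon : List (Int × Int)) (axa : String) : Bool :=
  let n : Int := polygon.length
  let key : Int := if axa == "x" then 0 else 1
  let st := (PySem.List.pyRange 1 n 1).foldl
    (fun (st : Int × Int) i =>
      (if pvKeyAt polygon key i < pvKeyAt polygon key st.1 then i else st.1,
       if pvKeyAt polygon key i > pvKeyAt polygon key st.2 then i else st.2))
    (0, 0)
  let ok1 := pvChainUp polygon key n st.2 st.1 polygon.length
  let ok2 := pvChainDown polygon key n st.2 st.1 polygon.length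
  ok1 && ok2

-- ===== PORT B =====
-- all(x <= y for x, y in zip(l, l[1:]))
def pvNonDec (l : List Int) : Bool := (l.zip l.tail).all (fun p => p.1 ≤ p.2)
-- all(x >= y for x, y in zip(l, l[1:]))
def pvNonInc (l : List Int) : Bool := (l.zip l.tail).all (fun p => p.2 ≤ p.1)

def monoton_alt (polygon : List (Int × Int)) (axa : String) : Bool :=
  let key : Int := if axa == "x" then 0 else 1
  let ks := polygon.map (fun p => if key == 0 then p.1 else p.2)
  if ks.isEmpty then true
  else
    let n : Int := ks.length
    -- min(ks) / max(ks) / ks.index(...) / rot[0]: ks is nonempty here, so the `getD` defaults are unreachable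
    let lo := (PySem.List.min? ks (fun x => x)).getD 0
    let hi := (PySem.List.max? ks (fun x => x)).getD 0
    let i0 : Int := ((PySem.List.index? ks lo).getD 0 : Nat)
    let i1 : Int := ((PySem.List.index? ks hi).getD 0 : Nat)
    let rot := PySem.List.slice ks (some i0) none ++ PySem.List.slice ks none (some i0)
    let m := PySem.Int.mod (i1 - i0) n
    let up := PySem.List.slice rot none (some (m + 1))
    let down := PySem.List.slice rot (some m) none ++ [(PySem.List.pyGet? rot 0).getD 0]
    pvNonDec up && pvNonInc down

-- ===== PRECONDITION & SPEC =====
def Spec_monoton (polygon : List (Int × Int)) (axa : String) (out : Bool) : Prop := out = monoton_alt polygon axa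
instance (polygon : List (Int × Int)) (axa : String) (out : Bool) : Decidable (Spec_monoton polygon axa out) := by unfold Spec_monoton; infer_instance

-- ===== CLAIM (what is proved, stated in full; the proofs are below) =====
def Claim_equal_monoton : Prop := ∀ (polygon : List (Int × Int)) (axa : String), Dom_monoton polygon axa → Spec_monoton polygon axa (monoton polygon axa)

-- ===== LEMMAS AND PROOFS =====

-- value of the key list at an Int position (proof-side view of both ports)
def pvG (ks : List Int) (i : Int) : Int := ks.getD i.toNat 0

-- one cyclic step is non-decreasing / non-increasing at position j (mod n)
def pvStepUp (ks : List Int) (j : Int) : Prop :=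
  pvG ks (j % (ks.length : Int)) ≤ pvG ks ((j + 1) % (ks.length : Int))

def pvStepDn (ks : List Int) (j : Int) : Prop :=
  pvG ks ((j + 1) % (ks.length : Int)) ≤ pvG ks (j % (ks.length : Int))

theorem pvStepUp_congr (ks : List Int) (j j' : Int)
    (h : j % (ks.length : Int) = j' % (ks.length : Int)) :
    pvStepUp ks j ↔ pvStepUp ks j' := by
  unfold pvStepUp
  have h2 : (j + 1) % (ks.length : Int) = (j' + 1) % (ks.length : Int) := by
    rw [Int.add_emod j 1, Int.add_emod j' 1, h]
  rw [h, h2]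

theorem pvStepDn_congr (ks : List Int) (j j' : Int)
    (h : j % (ks.length : Int) = j' % (ks.length : Int)) :
    pvStepDn ks j ↔ pvStepDn ks j' := by
  unfold pvStepDn
  have h2 : (j + 1) % (ks.length : Int) = (j' + 1) % (ks.length : Int) := by
    rw [Int.add_emod j 1, Int.add_emod j' 1, h]
  rw [h, h2]

theorem pvKeyAt_eq (polygon : List (Int × Int)) (key i : Int)
    (h0 : 0 ≤ i) (h1 : i < polygon.length) :
    pvKeyAt polygon key i
      = pvG (polygon.map (fun p => if key == 0 then p.1 else p.2)) i := by
  unfold pvKeyAt pvG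
  rw [PySem.List.pyGet?_of_nonneg polygon h0]
  have hlt : i.toNat < polygon.length := by omega
  simp [hlt, List.getD]

theorem pvEmodSmall (x N : Int) (_hN : 0 < N) (hlo : -N ≤ x) (hhi : x < N) :
    x % N = if x < 0 then x + N else x := by
  split_ifs with hx
  · rw [← Int.add_emod_right x N]
    exact Int.emod_eq_of_lt (by omega) (by omega)
  · exact Int.emod_eq_of_lt (by omega) hhi

theorem pvAddEmodLeft (a b N : Int) : (a % N + b) % N = (a + b) % N := by
  conv_rhs => rw [Int.add_emod]
  rw [Int.add_emod (a % N) b, Int.emod_emod_of_dvd a dvd_rfl]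

theorem pvSubEmodRight (a b N : Int) : (a - b % N) % N = (a - b) % N := by
  conv_rhs => rw [Int.sub_emod]
  rw [Int.sub_emod a (b % N), Int.emod_emod_of_dvd b dvd_rfl]

theorem pvChainUp_iff (polygon : List (Int × Int)) (key : Int) (ks : List Int)
    (hks : ks = polygon.map (fun p => if key == 0 then p.1 else p.2)) :
    ∀ (fuel : Nat) (i maxI : Int),
    0 ≤ i → i < ks.length → 0 ≤ maxI → maxI < ks.length →
    ((maxI - i) % (ks.length : Int)).toNat ≤ fuel →
    (pvChainUp polygon key (ks.length : Int) maxI i fuel = true ↔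
      ∀ t : Nat, t < ((maxI - i) % (ks.length : Int)).toNat → pvStepUp ks (i + t)) := by
  intro fuel
  induction fuel with
  | zero =>
    intro i maxI h0 h1 h2 h3 hfuel
    simp only [pvChainUp]
    constructor
    · intro _ t ht; omega
    · intro _; trivial
  | succ fuel ih =>
    intro i maxI h0 h1 h2 h3 hfuel
    have hN : (0 : Int) < ks.length := by omega
    have hlen : (polygon.length : Int) = (ks.length : Int) := by rw [hks]; simp
    by_cases hieq : i = maxI
    · subst hieq
      have hz : (i - i) % (ks.length : Int) = 0 := by simp
      simp only [pvChainUp]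
      constructor
      · intro _ t ht; rw [hz] at ht; omega
      · intro _; trivial
    · have hr := pvEmodSmall (maxI - i) (ks.length : Int) hN (by omega) (by omega)
      have hdpos : 0 < ((maxI - i) % (ks.length : Int)).toNat := by
        rw [hr]; split_ifs with hx <;> omega
      have hnext0 : 0 ≤ (i + 1) % (ks.length : Int) := Int.emod_nonneg _ (by omega)
      have hnextN : (i + 1) % (ks.length : Int) < (ks.length : Int) :=
        Int.emod_lt_of_pos _ hN
      have hii : i % (ks.length : Int) = i := Int.emod_eq_of_lt h0 h1
      have hdnext : ((maxI - (i + 1) % (ks.length : Int)) % (ks.length : Int)).toNat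
          = ((maxI - i) % (ks.length : Int)).toNat - 1 := by
        rw [pvSubEmodRight]
        have hr' := pvEmodSmall (maxI - (i + 1)) (ks.length : Int) hN (by omega) (by omega)
        rw [hr', hr]
        split_ifs with hx hy hy <;> omega
      have hKnext : pvKeyAt polygon key ((i + 1) % (ks.length : Int))
          = pvG ks ((i + 1) % (ks.length : Int)) := by
        rw [pvKeyAt_eq polygon key _ hnext0 (by omega), ← hks]
      have hKi : pvKeyAt polygon key i = pvG ks i := by
        rw [pvKeyAt_eq polygon key i h0 (by omega), ← hks]
      simp only [pvChainUp, if_neg hieq, PySem.Int.mod_eq_emod_of_pos hN, hKnext, hKi]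
      by_cases hlt : pvG ks ((i + 1) % (ks.length : Int)) < pvG ks i
      · rw [if_pos hlt]
        constructor
        · intro hfalse; exact absurd hfalse (by simp)
        · intro hall
          exfalso
          have h00 := hall 0 hdpos
          unfold pvStepUp at h00
          simp only [Nat.cast_zero, add_zero] at h00
          rw [hii] at h00
          omega
      · rw [if_neg hlt]
        rw [ih ((i + 1) % (ks.length : Int)) maxI hnext0 hnextN h2 h3 (by omega)]
        constructor
        · intro hall t ht
          rcases Nat.eq_zero_or_pos t with h | h
          · subst h
            unfold pvStepUp
            simp only [Nat.cast_zero, add_zero]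
            rw [hii]
            omega
          · obtain ⟨t', rfl⟩ : ∃ t', t = t' + 1 := ⟨t - 1, by omega⟩
            have := hall t' (by omega)
            rw [pvStepUp_congr ks ((i + 1) % (ks.length : Int) + t') (i + (t' + 1 : Nat))
              (by rw [pvAddEmodLeft]; congr 1; push_cast; ring)] at this
            exact this
        · intro hall t' ht'
          have := hall (t' + 1) (by omega)
          rw [pvStepUp_congr ks ((i + 1) % (ks.length : Int) + t') (i + (t' + 1 : Nat))
            (by rw [pvAddEmodLeft]; congr 1; push_cast; ring)]
          exact this

theorem pvChainDown_iff (polygon : List (Int × Int)) (key : Int) (ks : List Int)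
    (hks : ks = polygon.map (fun p => if key == 0 then p.1 else p.2)) :
    ∀ (fuel : Nat) (i maxI : Int),
    0 ≤ i → i < ks.length → 0 ≤ maxI → maxI < ks.length →
    ((i - maxI) % (ks.length : Int)).toNat ≤ fuel →
    (pvChainDown polygon key (ks.length : Int) maxI i fuel = true ↔
      ∀ t : Nat, t < ((i - maxI) % (ks.length : Int)).toNat → pvStepDn ks (i - 1 - t)) := by
  intro fuel
  induction fuel with
  | zero =>
    intro i maxI h0 h1 h2 h3 hfuel
    simp only [pvChainDown]
    constructor
    · intro _ t ht; omega
    · intro _; trivial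
  | succ fuel ih =>
    intro i maxI h0 h1 h2 h3 hfuel
    have hN : (0 : Int) < ks.length := by omega
    by_cases hieq : i = maxI
    · subst hieq
      have hz : (i - i) % (ks.length : Int) = 0 := by simp
      simp only [pvChainDown]
      constructor
      · intro _ t ht; rw [hz] at ht; omega
      · intro _; trivial
    · have hlen : (polygon.length : Int) = (ks.length : Int) := by rw [hks]; simp
      have hr := pvEmodSmall (i - maxI) (ks.length : Int) hN (by omega) (by omega)
      have hdpos : 0 < ((i - maxI) % (ks.length : Int)).toNat := by
        rw [hr]; split_ifs with hx <;> omega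
      have hprev0 : 0 ≤ (i - 1 + (ks.length : Int)) % (ks.length : Int) :=
        Int.emod_nonneg _ (by omega)
      have hprevN : (i - 1 + (ks.length : Int)) % (ks.length : Int) < (ks.length : Int) :=
        Int.emod_lt_of_pos _ hN
      have hprevE : (i - 1 + (ks.length : Int)) % (ks.length : Int)
          = (i - 1) % (ks.length : Int) := Int.add_emod_right _ _
      have hii : i % (ks.length : Int) = i := Int.emod_eq_of_lt h0 h1
      have hdprev : (((i - 1 + (ks.length : Int)) % (ks.length : Int) - maxI)
            % (ks.length : Int)).toNat
          = ((i - maxI) % (ks.length : Int)).toNat - 1 := by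
        have e1 : ((i - 1 + (ks.length : Int)) % (ks.length : Int) - maxI)
            % (ks.length : Int) = (i - 1 + (ks.length : Int) - maxI) % (ks.length : Int) := by
          have := pvAddEmodLeft (i - 1 + (ks.length : Int)) (-maxI) (ks.length : Int)
          simpa [sub_eq_add_neg] using this
        have e2 : (i - 1 + (ks.length : Int) - maxI) % (ks.length : Int)
            = (i - 1 - maxI) % (ks.length : Int) := by
          have := Int.add_emod_right (i - 1 - maxI) (ks.length : Int)
          calc (i - 1 + (ks.length : Int) - maxI) % (ks.length : Int)
              = (i - 1 - maxI + (ks.length : Int)) % (ks.length : Int) := by ring_nf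
            _ = (i - 1 - maxI) % (ks.length : Int) := this
        rw [e1, e2]
        have hr' := pvEmodSmall (i - 1 - maxI) (ks.length : Int) hN (by omega) (by omega)
        rw [hr', hr]
        split_ifs with hx hy hy <;> omega
      have hKprev : pvKeyAt polygon key ((i - 1 + (ks.length : Int)) % (ks.length : Int))
          = pvG ks ((i - 1 + (ks.length : Int)) % (ks.length : Int)) := by
        rw [pvKeyAt_eq polygon key _ hprev0 (by omega), ← hks]
      have hKi : pvKeyAt polygon key i = pvG ks i := by
        rw [pvKeyAt_eq polygon key i h0 (by omega), ← hks]
      simp only [pvChainDown, if_neg hieq, PySem.Int.mod_eq_emod_of_pos hN, hKprev, hKi]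
      have hstep0 : pvStepDn ks (i - 1) ↔
          pvG ks i ≤ pvG ks ((i - 1 + (ks.length : Int)) % (ks.length : Int)) := by
        unfold pvStepDn
        rw [hprevE]
        have : (i - 1 + 1) % (ks.length : Int) = i := by rw [sub_add_cancel, hii]
        rw [this]
      by_cases hlt : pvG ks ((i - 1 + (ks.length : Int)) % (ks.length : Int)) < pvG ks i
      · rw [if_pos hlt]
        constructor
        · intro hfalse; exact absurd hfalse (by simp)
        · intro hall
          exfalso
          have h00 := hall 0 hdpos
          simp only [Nat.cast_zero, sub_zero] at h00
          rw [hstep0] at h00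
          omega
      · rw [if_neg hlt]
        rw [ih ((i - 1 + (ks.length : Int)) % (ks.length : Int)) maxI hprev0 hprevN h2 h3
          (by omega)]
        have hcongr : ∀ t' : Nat,
            (pvStepDn ks ((i - 1 + (ks.length : Int)) % (ks.length : Int) - 1 - t') ↔
             pvStepDn ks (i - 1 - (t' + 1 : Nat))) := by
          intro t'
          apply pvStepDn_congr
          rw [show ((i - 1 + (ks.length : Int)) % (ks.length : Int) - 1 - (t' : Int))
              = ((i - 1 + (ks.length : Int)) % (ks.length : Int) + (-1 - t')) by ring]
          rw [pvAddEmodLeft]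
          rw [show (i - 1 + (ks.length : Int) + (-1 - (t' : Int)))
              = (i - 1 - ((t' : Int) + 1) + (ks.length : Int)) by ring]
          rw [Int.add_emod_right]
          push_cast
          ring_nf
        constructor
        · intro hall t ht
          rcases Nat.eq_zero_or_pos t with h | h
          · subst h
            simp only [Nat.cast_zero, sub_zero]
            rw [hstep0]
            omega
          · obtain ⟨t', rfl⟩ : ∃ t', t = t' + 1 := ⟨t - 1, by omega⟩
            rw [← hcongr t']
            exact hall t' (by omega)
        · intro hall t' ht'
          rw [hcongr t']
          exact hall (t' + 1) (by omega)

theorem pvNonDec_iff (l : List Int) :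
    pvNonDec l = true ↔ ∀ t : Nat, t + 1 < l.length → l.getD t 0 ≤ l.getD (t + 1) 0 := by
  induction l with
  | nil => simp [pvNonDec]
  | cons x tl ih =>
    cases tl with
    | nil => simp [pvNonDec]
    | cons y tl2 =>
      simp only [pvNonDec, List.tail_cons, List.zip_cons_cons, List.all_cons,
        Bool.and_eq_true, decide_eq_true_eq] at *
      rw [ih]
      constructor
      · rintro ⟨hxy, hrest⟩ t ht
        cases t with
        | zero => simpa using hxy
        | succ t' =>
          have := hrest t' (by simpa using ht)
          simpa using this
      · intro hall
        refine ⟨by simpa using hall 0 (by simp), ?_⟩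
        intro t ht
        have := hall (t + 1) (by simpa using ht)
        simpa using this

theorem pvNonInc_iff (l : List Int) :
    pvNonInc l = true ↔ ∀ t : Nat, t + 1 < l.length → l.getD (t + 1) 0 ≤ l.getD t 0 := by
  induction l with
  | nil => simp [pvNonInc]
  | cons x tl ih =>
    cases tl with
    | nil => simp [pvNonInc]
    | cons y tl2 =>
      simp only [pvNonInc, List.tail_cons, List.zip_cons_cons, List.all_cons,
        Bool.and_eq_true, decide_eq_true_eq] at *
      rw [ih]
      constructor
      · rintro ⟨hxy, hrest⟩ t ht
        cases t with
        | zero => simpa using hxy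
        | succ t' =>
          have := hrest t' (by simpa using ht)
          simpa using this
      · intro hall
        refine ⟨by simpa using hall 0 (by simp), ?_⟩
        intro t ht
        have := hall (t + 1) (by simpa using ht)
        simpa using this

theorem pvGetD_drop (l : List Int) (i j : Nat) : (l.drop i).getD j 0 = l.getD (i + j) 0 := by
  simp [List.getD, List.getElem?_drop]

theorem pvGetD_take (l : List Int) (i j : Nat) (h : j < i) :
    (l.take i).getD j 0 = l.getD j 0 := by
  simp [List.getD, h]

theorem pvRotGetD (ks : List Int) (i0 : Nat) (h : i0 < ks.length) (j : Nat)
    (hj : j < ks.length) :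
    (ks.drop i0 ++ ks.take i0).getD j 0 = ks.getD ((i0 + j) % ks.length) 0 := by
  by_cases hcase : j < ks.length - i0
  · rw [List.getD_append _ _ _ _ (by simp; omega)]
    rw [pvGetD_drop]
    congr 1
    rw [Nat.mod_eq_of_lt (by omega)]
  · rw [List.getD_append_right _ _ _ _ (by simp; omega)]
    rw [List.length_drop]
    rw [pvGetD_take _ _ _ (by omega)]
    congr 1
    rw [Nat.mod_eq_sub_mod (by omega), Nat.mod_eq_of_lt (by omega)]
    omega

theorem pvGcast (ks : List Int) (a : Nat) :
    pvG ks ((a : Int) % (ks.length : Int)) = ks.getD (a % ks.length) 0 := by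
  unfold pvG
  congr 1

-- first index of the minimum / maximum among the first j entries
def pvFMin (ks : List Int) (j : Nat) (mi : Int) : Prop :=
  0 ≤ mi ∧ mi < j ∧ (∀ k : Nat, k < j → pvG ks mi ≤ ks.getD k 0) ∧
    (∀ k : Nat, (k : Int) < mi → pvG ks mi < ks.getD k 0)

def pvFMax (ks : List Int) (j : Nat) (ma : Int) : Prop :=
  0 ≤ ma ∧ ma < j ∧ (∀ k : Nat, k < j → ks.getD k 0 ≤ pvG ks ma) ∧
    (∀ k : Nat, (k : Int) < ma → ks.getD k 0 < pvG ks ma)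

theorem pvFMin_unique (ks : List Int) (a b : Int)
    (ha : pvFMin ks ks.length a) (hb : pvFMin ks ks.length b) : a = b := by
  obtain ⟨ha0, haL, hale, halt⟩ := ha
  obtain ⟨hb0, hbL, hble, hblt⟩ := hb
  by_contra hne
  rcases lt_or_gt_of_ne hne with h | h
  · have h1 := hblt a.toNat (by omega)
    have h2 := hale b.toNat (by omega)
    have h3 : ks.getD a.toNat 0 = pvG ks a := rfl
    have h4 : ks.getD b.toNat 0 = pvG ks b := rfl
    rw [h3] at h1; rw [h4] at h2; linarith
  · have h1 := halt b.toNat (by omega)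
    have h2 := hble a.toNat (by omega)
    have h3 : ks.getD a.toNat 0 = pvG ks a := rfl
    have h4 : ks.getD b.toNat 0 = pvG ks b := rfl
    rw [h4] at h1; rw [h3] at h2; linarith

theorem pvFMax_unique (ks : List Int) (a b : Int)
    (ha : pvFMax ks ks.length a) (hb : pvFMax ks ks.length b) : a = b := by
  obtain ⟨ha0, haL, hale, halt⟩ := ha
  obtain ⟨hb0, hbL, hble, hblt⟩ := hb
  by_contra hne
  rcases lt_or_gt_of_ne hne with h | h
  · have h1 := hblt a.toNat (by omega)
    have h2 := hale b.toNat (by omega)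
    have h3 : ks.getD a.toNat 0 = pvG ks a := rfl
    have h4 : ks.getD b.toNat 0 = pvG ks b := rfl
    rw [h3] at h1; rw [h4] at h2; linarith
  · have h1 := halt b.toNat (by omega)
    have h2 := hble a.toNat (by omega)
    have h3 : ks.getD a.toNat 0 = pvG ks a := rfl
    have h4 : ks.getD b.toNat 0 = pvG ks b := rfl
    rw [h4] at h1; rw [h3] at h2; linarith

theorem pvRevIndex (d : Nat) (P Q : Nat → Prop)
    (h : ∀ s : Nat, s < d → (P (d - 1 - s) ↔ Q s)) :
    ((∀ t : Nat, t < d → P t) ↔ (∀ s : Nat, s < d → Q s)) := by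
  constructor
  · intro hall s hs
    rw [← h s hs]
    exact hall _ (by omega)
  · intro hall t ht
    have := (h (d - 1 - t) (by omega)).mpr (hall _ (by omega))
    rwa [show d - 1 - (d - 1 - t) = t by omega] at this

theorem pvGnat (ks : List Int) (j : Nat) : pvG ks (j : Int) = ks.getD j 0 := by
  unfold pvG; simp

theorem pvFold_spec (polygon : List (Int × Int)) (key : Int) (ks : List Int)
    (hks : ks = polygon.map (fun p => if key == 0 then p.1 else p.2)) :
    ∀ j : Nat, 1 ≤ j → j ≤ ks.length →
    pvFMin ks j ((PySem.List.pyRange 1 (j : Int) 1).foldl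
      (fun (st : Int × Int) i =>
        (if pvKeyAt polygon key i < pvKeyAt polygon key st.1 then i else st.1,
         if pvKeyAt polygon key i > pvKeyAt polygon key st.2 then i else st.2)) (0, 0)).1
    ∧ pvFMax ks j ((PySem.List.pyRange 1 (j : Int) 1).foldl
      (fun (st : Int × Int) i =>
        (if pvKeyAt polygon key i < pvKeyAt polygon key st.1 then i else st.1,
         if pvKeyAt polygon key i > pvKeyAt polygon key st.2 then i else st.2)) (0, 0)).2 := by
  have hlen : polygon.length = ks.length := by rw [hks]; simp
  intro j
  induction j with
  | zero => intro h1 _; omega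
  | succ j ih =>
    intro _ hle
    rcases Nat.eq_zero_or_pos j with hj0 | hjpos
    · subst hj0
      have hnil : PySem.List.pyRange 1 ((1 : Nat) : Int) 1 = [] :=
        PySem.List.pyRange_one_eq_nil (by norm_num)
      rw [hnil]
      simp only [List.foldl_nil]
      constructor
      · exact ⟨le_refl 0, by norm_num, by
          intro k hk
          interval_cases k
          simp [pvG], by intro k hk; omega⟩
      · exact ⟨le_refl 0, by norm_num, by
          intro k hk
          interval_cases k
          simp [pvG], by intro k hk; omega⟩
    · have hstep : PySem.List.pyRange 1 ((j + 1 : Nat) : Int) 1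
          = PySem.List.pyRange 1 (j : Int) 1 ++ [(j : Int)] := by
        have : ((j + 1 : Nat) : Int) = (j : Int) + 1 := by push_cast; ring
        rw [this]
        exact PySem.List.pyRange_one_succ_right (by omega)
      rw [hstep, List.foldl_append]
      obtain ⟨hmin, hmax⟩ := ih hjpos (by omega)
      set st := ((PySem.List.pyRange 1 (j : Int) 1).foldl
        (fun (st : Int × Int) i =>
          (if pvKeyAt polygon key i < pvKeyAt polygon key st.1 then i else st.1,
           if pvKeyAt polygon key i > pvKeyAt polygon key st.2 then i else st.2)) (0, 0)) with hst
      obtain ⟨hm0, hmJ, hmle, hmlt⟩ := hmin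
      obtain ⟨hM0, hMJ, hMle, hMlt⟩ := hmax
      have hGj : pvKeyAt polygon key (j : Int) = pvG ks (j : Int) := by
        rw [pvKeyAt_eq polygon key _ (by omega) (by omega), ← hks]
      have hG1 : pvKeyAt polygon key st.1 = pvG ks st.1 := by
        rw [pvKeyAt_eq polygon key _ hm0 (by omega), ← hks]
      have hG2 : pvKeyAt polygon key st.2 = pvG ks st.2 := by
        rw [pvKeyAt_eq polygon key _ hM0 (by omega), ← hks]
      simp only [List.foldl_cons, List.foldl_nil, hGj, hG1, hG2]
      constructor
      · by_cases hc : pvG ks (j : Int) < pvG ks st.1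
        · rw [if_pos hc]
          refine ⟨by omega, by omega, ?_, ?_⟩
          · intro k hk
            rcases Nat.lt_or_ge k j with hkj | hkj
            · have h1 := hmle k hkj
              have h2 := hc
              rw [pvGnat] at h2 ⊢
              linarith
            · have hkj' : k = j := by omega
              subst hkj'
              rw [pvGnat]
          · intro k hk
            have hkj : k < j := by omega
            have h1 := hmle k hkj
            linarith
        · rw [if_neg hc]
          refine ⟨hm0, by omega, ?_, hmlt⟩
          intro k hk
          rcases Nat.lt_or_ge k j with hkj | hkj
          · exact hmle k hkj
          · have hkj' : k = j := by omega
            subst hkj'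
            rw [← pvGnat]
            omega
      · by_cases hc : pvG ks (j : Int) > pvG ks st.2
        · rw [if_pos hc]
          refine ⟨by omega, by omega, ?_, ?_⟩
          · intro k hk
            rcases Nat.lt_or_ge k j with hkj | hkj
            · have h1 := hMle k hkj
              have h2 := hc
              rw [pvGnat] at h2 ⊢
              linarith
            · have hkj' : k = j := by omega
              subst hkj'
              rw [pvGnat]
          · intro k hk
            have hkj : k < j := by omega
            have h1 := hMle k hkj
            linarith
        · rw [if_neg hc]
          refine ⟨hM0, by omega, ?_, hMlt⟩
          intro k hk
          rcases Nat.lt_or_ge k j with hkj | hkj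
          · exact hMle k hkj
          · have hkj' : k = j := by omega
            subst hkj'
            rw [← pvGnat]
            omega

theorem pvIdxMin_spec (ks : List Int) (lo : Int)
    (hlo : PySem.List.min? ks (fun x => x) = some lo) :
    pvFMin ks ks.length ((((PySem.List.index? ks lo).getD 0 : Nat) : Int)) := by
  have hmem := PySem.List.min?_mem hlo
  have hmin : ∀ y ∈ ks, lo ≤ y := by
    have := PySem.List.min?_isMin hlo; simpa using this
  have hsome := (PySem.List.index?_isSome_iff ks lo).mpr hmem
  obtain ⟨k, hk⟩ := Option.isSome_iff_exists.mp hsome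
  rw [hk]
  simp only [Option.getD_some]
  obtain ⟨hkL, hkv, hkfirst⟩ := PySem.List.getElem_of_index?_eq_some hk
  have hval : pvG ks (k : Int) = lo := by
    rw [pvGnat, List.getD_eq_getElem ks 0 hkL, hkv]
  refine ⟨by positivity, by omega, ?_, ?_⟩
  · intro m hm
    rw [hval, List.getD_eq_getElem ks 0 hm]
    exact hmin _ (List.getElem_mem hm)
  · intro m hm
    have hmk : m < k := by omega
    have hne := hkfirst m hmk
    have hle := hmin ks[m] (List.getElem_mem (by omega))
    rw [hval, List.getD_eq_getElem ks 0 (by omega)]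
    omega

theorem pvIdxMax_spec (ks : List Int) (hi : Int)
    (hhi : PySem.List.max? ks (fun x => x) = some hi) :
    pvFMax ks ks.length ((((PySem.List.index? ks hi).getD 0 : Nat) : Int)) := by
  have hmem := PySem.List.max?_mem hhi
  have hmax : ∀ y ∈ ks, y ≤ hi := by
    have := PySem.List.max?_isMax hhi; simpa using this
  have hsome := (PySem.List.index?_isSome_iff ks hi).mpr hmem
  obtain ⟨k, hk⟩ := Option.isSome_iff_exists.mp hsome
  rw [hk]
  simp only [Option.getD_some]
  obtain ⟨hkL, hkv, hkfirst⟩ := PySem.List.getElem_of_index?_eq_some hk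
  have hval : pvG ks (k : Int) = hi := by
    rw [pvGnat, List.getD_eq_getElem ks 0 hkL, hkv]
  refine ⟨by positivity, by omega, ?_, ?_⟩
  · intro m hm
    rw [hval, List.getD_eq_getElem ks 0 hm]
    exact hmax _ (List.getElem_mem hm)
  · intro m hm
    have hmk : m < k := by omega
    have hne := hkfirst m hmk
    have hle := hmax ks[m] (List.getElem_mem (by omega))
    rw [hval, List.getD_eq_getElem ks 0 (by omega)]
    omega

theorem pvStepUp_getD (ks : List Int) (a : Nat) :
    pvStepUp ks (a : Int) ↔ ks.getD (a % ks.length) 0 ≤ ks.getD ((a + 1) % ks.length) 0 := by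
  unfold pvStepUp
  rw [pvGcast]
  rw [show ((a : Int) + 1) = ((a + 1 : Nat) : Int) by push_cast; ring, pvGcast]

theorem pvStepDn_getD (ks : List Int) (a : Nat) :
    pvStepDn ks (a : Int) ↔ ks.getD ((a + 1) % ks.length) 0 ≤ ks.getD (a % ks.length) 0 := by
  unfold pvStepDn
  rw [pvGcast]
  rw [show ((a : Int) + 1) = ((a + 1 : Nat) : Int) by push_cast; ring, pvGcast]

theorem pvUpSide (polygon : List (Int × Int)) (key : Int) (ks : List Int)
    (hks : ks = polygon.map (fun p => if key == 0 then p.1 else p.2))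
    (k0 k1 : Nat) (hk0 : k0 < ks.length) (hk1 : k1 < ks.length) :
    pvChainUp polygon key (ks.length : Int) (k1 : Int) (k0 : Int) ks.length
      = pvNonDec ((ks.drop k0 ++ ks.take k0).take
          ((((k1 : Int) - (k0 : Int)) % (ks.length : Int)).toNat + 1)) := by
  have hN : (0 : Int) < (ks.length : Int) := by omega
  set mN := (((k1 : Int) - (k0 : Int)) % (ks.length : Int)).toNat with hmN
  have hmod0 : 0 ≤ ((k1 : Int) - (k0 : Int)) % (ks.length : Int) := Int.emod_nonneg _ (by omega)
  have hmodN : ((k1 : Int) - (k0 : Int)) % (ks.length : Int) < (ks.length : Int) :=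
    Int.emod_lt_of_pos _ hN
  have hmNlt : mN < ks.length := by omega
  set rot := ks.drop k0 ++ ks.take k0 with hrot
  have hrotlen : rot.length = ks.length := by rw [hrot]; simp; omega
  have huplen : (rot.take (mN + 1)).length = mN + 1 := by
    rw [List.length_take]; omega
  rw [Bool.eq_iff_iff]
  rw [pvChainUp_iff polygon key ks hks ks.length (k0 : Int) (k1 : Int)
    (by omega) (by omega) (by omega) (by omega) (by omega)]
  rw [pvNonDec_iff]
  rw [huplen]
  constructor
  · intro hall t ht
    have ht' : t < mN := by omega
    have h1 := hall t (by omega)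
    rw [show ((k0 : Int) + (t : Int)) = ((k0 + t : Nat) : Int) by push_cast; ring,
      pvStepUp_getD] at h1
    rw [pvGetD_take _ _ _ (by omega), pvGetD_take _ _ _ (by omega),
      pvRotGetD ks k0 hk0 t (by omega), pvRotGetD ks k0 hk0 (t + 1) (by omega)]
    rw [show k0 + (t + 1) = k0 + t + 1 by ring]
    exact h1
  · intro hall t ht
    have h1 := hall t (by omega)
    rw [pvGetD_take _ _ _ (by omega), pvGetD_take _ _ _ (by omega),
      pvRotGetD ks k0 hk0 t (by omega), pvRotGetD ks k0 hk0 (t + 1) (by omega)] at h1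
    rw [show ((k0 : Int) + (t : Int)) = ((k0 + t : Nat) : Int) by push_cast; ring,
      pvStepUp_getD]
    rw [show k0 + (t + 1) = k0 + t + 1 by ring] at h1
    exact h1

theorem pvDnSide (polygon : List (Int × Int)) (key : Int) (ks : List Int)
    (hks : ks = polygon.map (fun p => if key == 0 then p.1 else p.2))
    (k0 k1 : Nat) (hk0 : k0 < ks.length) (hk1 : k1 < ks.length)
    (heq : k0 = k1 → ∀ a b : Nat, ks.getD (a % ks.length) 0 = ks.getD (b % ks.length) 0) :
    pvChainDown polygon key (ks.length : Int) (k1 : Int) (k0 : Int) ks.length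
      = pvNonInc ((ks.drop k0 ++ ks.take k0).drop
            ((((k1 : Int) - (k0 : Int)) % (ks.length : Int)).toNat)
          ++ [(ks.drop k0 ++ ks.take k0).getD 0 0]) := by
  have hN : (0 : Int) < (ks.length : Int) := by omega
  set mN := (((k1 : Int) - (k0 : Int)) % (ks.length : Int)).toNat with hmN
  have hmod0 : 0 ≤ ((k1 : Int) - (k0 : Int)) % (ks.length : Int) := Int.emod_nonneg _ (by omega)
  have hmodN : ((k1 : Int) - (k0 : Int)) % (ks.length : Int) < (ks.length : Int) :=
    Int.emod_lt_of_pos _ hN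
  have hmNlt : mN < ks.length := by omega
  set rot := ks.drop k0 ++ ks.take k0 with hrot
  have hrotlen : rot.length = ks.length := by rw [hrot]; simp; omega
  have hdownlen : (rot.drop mN ++ [rot.getD 0 0]).length = (ks.length - mN) + 1 := by
    simp only [List.length_append, List.length_cons, List.length_nil, List.length_drop, hrotlen]
  -- elements of the "down" list
  have hdget : ∀ s : Nat, s < ks.length - mN →
      (rot.drop mN ++ [rot.getD 0 0]).getD s 0 = ks.getD ((k0 + mN + s) % ks.length) 0 := by
    intro s hs
    rw [List.getD_append _ _ _ _ (by simp [hrotlen]; omega), pvGetD_drop,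
      pvRotGetD ks k0 hk0 (mN + s) (by omega)]
    rw [show k0 + (mN + s) = k0 + mN + s by ring]
  have hdlast : (rot.drop mN ++ [rot.getD 0 0]).getD (ks.length - mN) 0
      = ks.getD ((k0 + mN + (ks.length - mN)) % ks.length) 0 := by
    rw [List.getD_append_right _ _ _ _ (by simp only [List.length_drop, hrotlen]; omega)]
    have h0 : rot.getD 0 0 = ks.getD ((k0 + 0) % ks.length) 0 := pvRotGetD ks k0 hk0 0 (by omega)
    simp only [List.length_drop, hrotlen]
    rw [show ks.length - mN - (ks.length - mN) = 0 by omega]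
    simp only [List.getD_cons_zero] at *
    rw [h0]
    congr 1
    rw [show k0 + mN + (ks.length - mN) = k0 + ks.length by omega, Nat.add_mod_right,
      Nat.mod_eq_of_lt hk0, Nat.add_zero, Nat.mod_eq_of_lt hk0]
  have hfD0 : 0 ≤ ((k0 : Int) - (k1 : Int)) % (ks.length : Int) := Int.emod_nonneg _ (by omega)
  have hfDN : ((k0 : Int) - (k1 : Int)) % (ks.length : Int) < (ks.length : Int) :=
    Int.emod_lt_of_pos _ hN
  rw [Bool.eq_iff_iff]
  rw [pvChainDown_iff polygon key ks hks ks.length (k0 : Int) (k1 : Int)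
    (by omega) (by omega) (by omega) (by omega) (by omega)]
  rw [pvNonInc_iff, hdownlen]
  -- the non-increasing condition, uniformly over the wrap-around pair
  have hlist : (∀ t : Nat, t + 1 < ks.length - mN + 1 →
        (rot.drop mN ++ [rot.getD 0 0]).getD (t + 1) 0
          ≤ (rot.drop mN ++ [rot.getD 0 0]).getD t 0)
      ↔ ∀ s : Nat, s < ks.length - mN →
        ks.getD ((k0 + mN + s + 1) % ks.length) 0 ≤ ks.getD ((k0 + mN + s) % ks.length) 0 := by
    constructor
    · intro hall s hs
      have h1 := hall s (by omega)
      rw [hdget s hs] at h1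
      rcases Nat.lt_or_ge (s + 1) (ks.length - mN) with hcase | hcase
      · rw [hdget (s + 1) hcase] at h1
        rw [show k0 + mN + (s + 1) = k0 + mN + s + 1 by ring] at h1
        exact h1
      · have hse : s + 1 = ks.length - mN := by omega
        rw [hse, hdlast] at h1
        rw [show k0 + mN + s + 1 = k0 + mN + (ks.length - mN) by omega]
        exact h1
    · intro hall t ht
      have h1 := hall t (by omega)
      rw [hdget t (by omega)]
      rcases Nat.lt_or_ge (t + 1) (ks.length - mN) with hcase | hcase
      · rw [hdget (t + 1) hcase]
        rw [show k0 + mN + (t + 1) = k0 + mN + t + 1 by ring]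
        exact h1
      · have hse : t + 1 = ks.length - mN := by omega
        rw [hse, hdlast]
        rw [show k0 + mN + t + 1 = k0 + mN + (ks.length - mN) by omega] at h1
        exact h1
  rw [hlist]
  by_cases hk01 : k0 = k1
  · -- all keys equal: both sides hold
    have hallq := heq hk01
    have hd0 : (((k0 : Int) - (k1 : Int)) % (ks.length : Int)).toNat = 0 := by
      subst hk01; simp
    rw [hd0]
    constructor
    · intro _ s hs
      rw [hallq (k0 + mN + s + 1) (k0 + mN + s)]
    · intro _ t ht
      omega
  · -- proper rotation: reverse the walk
    have hr1 := pvEmodSmall ((k1 : Int) - (k0 : Int)) (ks.length : Int) hN (by omega) (by omega)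
    have hr2 := pvEmodSmall ((k0 : Int) - (k1 : Int)) (ks.length : Int) hN (by omega) (by omega)
    have hk01' : (k0 : Int) ≠ (k1 : Int) := by
      intro hc; exact hk01 (by omega)
    have hdD : (((k0 : Int) - (k1 : Int)) % (ks.length : Int)).toNat = ks.length - mN := by
      rw [hr2]; rw [hr1] at hmN
      split_ifs with hx <;> omega
    rw [hdD]
    apply pvRevIndex
    intro s hs
    have hcast : ((ks.length - mN - 1 - s : Nat) : Int) = (ks.length : Int) - mN - 1 - s := by
      omega
    have harg : ((k0 : Int) - 1 - ((ks.length - mN - 1 - s : Nat) : Int))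
        = ((k0 + mN + s : Nat) : Int) - (ks.length : Int) := by
      rw [hcast]; push_cast; omega
    rw [pvStepDn_congr ks _ ((k0 + mN + s : Nat) : Int)
      (by rw [harg, show ((k0 + mN + s : Nat) : Int) - (ks.length : Int)
            = ((k0 + mN + s : Nat) : Int) + (-(ks.length : Int)) by ring]
          rw [show (-(ks.length : Int)) = (ks.length : Int) * (-1) by ring]
          rw [Int.add_mul_emod_self_left])]
    exact pvStepDn_getD ks (k0 + mN + s)

-- ===== VERDICT (by name: the statement is the Claim_ definition above) =====
theorem monoton_spec : Claim_equal_monoton := by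
  intro polygon axa _
  unfold Spec_monoton
  simp only [monoton, monoton_alt]
  set key : Int := if axa == "x" then 0 else 1 with hkey
  set ks := polygon.map (fun p => if key == 0 then p.1 else p.2) with hks
  by_cases hemp : ks.isEmpty = true
  · have hpoly : polygon = [] := by
      rw [hks] at hemp
      simpa [List.isEmpty_iff] using hemp
    subst hpoly
    simp [pvChainUp, pvChainDown, PySem.List.pyRange_one_eq_nil, hemp]
  · have hne : ks ≠ [] := by simpa [List.isEmpty_iff] using hemp
    have hlen0 : 0 < ks.length := List.length_pos_iff.mpr hne
    have hN : (0 : Int) < (ks.length : Int) := by omega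
    have hlenpk : polygon.length = ks.length := by rw [hks]; simp
    rw [if_neg hemp]
    cases hminv : PySem.List.min? ks (fun x => x) with
    | none => exact absurd ((PySem.List.min?_eq_none_iff ks _).mp hminv) hne
    | some lo =>
    cases hmaxv : PySem.List.max? ks (fun x => x) with
    | none => exact absurd ((PySem.List.max?_eq_none_iff ks _).mp hmaxv) hne
    | some hi =>
    simp only [Option.getD_some]
    set k0 : Nat := (PySem.List.index? ks lo).getD 0 with hk0def
    set k1 : Nat := (PySem.List.index? ks hi).getD 0 with hk1def
    have hFmin := pvIdxMin_spec ks lo hminv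
    have hFmax := pvIdxMax_spec ks hi hmaxv
    rw [← hk0def] at hFmin
    rw [← hk1def] at hFmax
    have hk0lt : k0 < ks.length := by have := hFmin.2.1; omega
    have hk1lt : k1 < ks.length := by have := hFmax.2.1; omega
    have hFold := pvFold_spec polygon key ks hks ks.length (by omega) (le_refl _)
    rw [hlenpk]
    set st := ((PySem.List.pyRange 1 (ks.length : Int) 1).foldl
      (fun (st : Int × Int) i =>
        (if pvKeyAt polygon key i < pvKeyAt polygon key st.1 then i else st.1,
         if pvKeyAt polygon key i > pvKeyAt polygon key st.2 then i else st.2)) (0, 0)) with hst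
    have h1 : st.1 = (k0 : Int) := pvFMin_unique ks st.1 (k0 : Int) hFold.1 hFmin
    have h2 : st.2 = (k1 : Int) := pvFMax_unique ks st.2 (k1 : Int) hFold.2 hFmax
    rw [h1, h2]
    have hallEq : k0 = k1 → ∀ a b : Nat,
        ks.getD (a % ks.length) 0 = ks.getD (b % ks.length) 0 := by
      intro he a b
      have hva := hFmin.2.2.1 (a % ks.length) (Nat.mod_lt _ hlen0)
      have hvb := hFmin.2.2.1 (b % ks.length) (Nat.mod_lt _ hlen0)
      have hwa := hFmax.2.2.1 (a % ks.length) (Nat.mod_lt _ hlen0)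
      have hwb := hFmax.2.2.1 (b % ks.length) (Nat.mod_lt _ hlen0)
      have hvv : pvG ks (k1 : Int) = pvG ks (k0 : Int) := by rw [he]
      rw [hvv] at hwa hwb
      omega
    rw [pvUpSide polygon key ks hks k0 k1 hk0lt hk1lt,
      pvDnSide polygon key ks hks k0 k1 hk0lt hk1lt hallEq]
    -- reduce B's slices to drop/take
    rw [PySem.List.slice_from_natCast, PySem.List.slice_to_natCast]
    rw [PySem.Int.mod_eq_emod_of_pos hN]
    have hmod0 : 0 ≤ ((k1 : Int) - (k0 : Int)) % (ks.length : Int) :=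
      Int.emod_nonneg _ (by omega)
    rw [PySem.List.slice_to _ (by omega : (0:Int) ≤ ((k1 : Int) - (k0 : Int)) % (ks.length : Int) + 1)]
    rw [PySem.List.slice_from _ hmod0]
    rw [PySem.List.pyGet?_zero, ← List.getD_eq_getElem?_getD]
    have htn : (((k1 : Int) - (k0 : Int)) % (ks.length : Int) + 1).toNat
        = (((k1 : Int) - (k0 : Int)) % (ks.length : Int)).toNat + 1 := by omega
    rw [htn]
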